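-- pv_equiv track=rewrite | github.com/Office-omgeving/seo-chat | scripts/build_keyword_snapshot.py | select_shortlist
-- ===== SOURCE A (Python) =====
-- def keyword_relevance_score(keyword: str, services: list[str], regions: list[str]) -> tuple[int, int]:
--     lowered = keyword.lower()
--     service_hits = sum(1 for service in services if service.lower() in lowered)
--     region_hits = sum(1 for region in regions if region.lower() in lowered)
--     return service_hits, region_hits
--
-- def select_shortlist(idea_rows: list[dict], services: list[str], regions: list[str], top_n: int) -> list[str]:
--     ranked = []
--     for row in idea_rows:
--         keyword = row.get("keyword", "").strip()
--         if not keyword: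
--             continue
--         service_hits, region_hits = keyword_relevance_score(keyword, services, regions)
--         if service_hits == 0:
--             continue
--         ranked.append(
--             (
--                 service_hits,
--                 region_hits,
--                 int(row.get("avg_monthly_searches", 0) or 0),
--                 keyword,
--             )
--         )
--
--     ranked.sort(key=lambda item: (item[0], item[1], item[2], -len(item[3])), reverse=True)
--
--     shortlist: list[str] = []
--     seen = set()
--     for _, _, _, keyword in ranked:
--         lowered = keyword.lower()
--         if lowered in seen:
--             continue
--         seen.add(lowered)
--         shortlist.append(keyword)
--         if len(shortlist) >= top_n:
--             break
--     return shortlist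
-- ===== SOURCE B (Python) =====
-- def select_shortlist(idea_rows: list[dict], services: list[str], regions: list[str], top_n: int) -> list[str]:
--     # Dedup BEFORE ranking: one pass keeps, per lowered keyword, the earliest row with
--     # the highest searches value; the stored row index breaks all remaining sort ties,
--     # reproducing the stable sort + first-unseen scan of the original exactly.
--     best = {}
--     for i, row in enumerate(idea_rows):
--         keyword = row.get("keyword", "").strip()
--         if not keyword:
--             continue
--         lowered = keyword.lower()
--         service_hits = sum(1 for service in services if service.lower() in lowered)
--         if service_hits == 0:
--             continue
--         region_hits = sum(1 for region in regions if region.lower() in lowered)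
--         searches = int(row.get("avg_monthly_searches", 0) or 0)
--         cur = best.get(lowered)
--         if cur is None or searches > cur[2]:
--             best[lowered] = (service_hits, region_hits, searches, keyword, i)
--     uniques = sorted(
--         best.values(),
--         key=lambda t: (t[0], t[1], t[2], -len(t[3]), -t[4]),
--         reverse=True,
--     )
--     shortlist: list[str] = []
--     for t in uniques:
--         shortlist.append(t[3])
--         if len(shortlist) >= top_n:
--             break
--     return shortlist
-- ===== Notes on version B (the rewrite author's own statement) =====
-- stated objective: alternative
-- what changed: B dedups before ranking: one pass builds a dict keyed by lowered keyword holding the best row (highest searches, earliest row on ties, remembering its row index), then sorts only the unique representatives with the row index as final tie-break, instead of stable-sorting all kept rows and scanning the sorted list for first-unseen keywords.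
import Mathlib
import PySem

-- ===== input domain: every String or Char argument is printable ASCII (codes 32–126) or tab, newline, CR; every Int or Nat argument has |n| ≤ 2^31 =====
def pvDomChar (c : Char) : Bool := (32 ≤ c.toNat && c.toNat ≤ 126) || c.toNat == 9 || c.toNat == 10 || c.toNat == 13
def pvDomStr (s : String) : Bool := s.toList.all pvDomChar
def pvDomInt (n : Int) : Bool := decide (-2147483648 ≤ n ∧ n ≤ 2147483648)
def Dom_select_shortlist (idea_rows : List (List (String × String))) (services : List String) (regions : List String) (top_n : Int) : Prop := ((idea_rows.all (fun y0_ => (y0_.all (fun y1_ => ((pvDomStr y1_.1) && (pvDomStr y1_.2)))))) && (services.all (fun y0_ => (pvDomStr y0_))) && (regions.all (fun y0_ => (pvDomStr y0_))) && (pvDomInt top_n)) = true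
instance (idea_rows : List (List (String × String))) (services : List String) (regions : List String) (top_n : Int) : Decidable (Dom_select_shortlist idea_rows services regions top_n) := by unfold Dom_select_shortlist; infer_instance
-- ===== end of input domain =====

-- B dedups per lowered keyword in one dict pass (keeping the best row and its index) and sorts
-- only the unique representatives, instead of A's stable sort of all rows + first-unseen scan;
-- same results, no speed claim.

-- Helpers shared by both ports (row-level primitives both Pythons contain verbatim):
-- keyword extraction, the hit counts, and int(row.get("avg_monthly_searches", 0) or 0)
-- (where Python's int(v) raises ValueError, PySem.Int.ofStr? is none — excluded by Pre_, .getD 0 is never reached inside Pre_).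
def pvKw (row : List (String × String)) : String :=
  PySem.Str.strip ((PySem.Dict.ofList row).getD "keyword" "")

def pvHits (lowered : String) (names : List String) : Int :=
  names.foldl (fun acc nm => if PySem.Str.isIn (PySem.Str.lower nm) lowered then acc + 1 else acc) 0

def pvSearches (row : List (String × String)) : Int :=
  match (PySem.Dict.ofList row).get? "avg_monthly_searches" with
  | none => 0
  | some v => if v = "" then 0 else (PySem.Int.ofStr? v).getD 0

-- ===== PORT A =====
def keyword_relevance_score (keyword : String) (services : List String) (regions : List String) : Int × Int :=
  (pvHits (PySem.Str.lower keyword) services, pvHits (PySem.Str.lower keyword) regions)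

-- the sort key (item[0], item[1], item[2], -len(item[3])): Python tuple comparison is lexicographic
def pvKeyA (t : Int × Int × Int × String) : Lex (Int × Lex (Int × Lex (Int × Int))) :=
  toLex (t.1, toLex (t.2.1, toLex (t.2.2.1, -PySem.Str.len t.2.2.2)))

-- A's final loop: skip seen lowered keywords, append, break as soon as len(shortlist) >= top_n
def pvTakeA : List (Int × Int × Int × String) → List String → PySem.Set String → Int → List String
  | [], shortlist, _, _ => shortlist
  | t :: rest, shortlist, seen, n =>
    let lowered := PySem.Str.lower t.2.2.2
    if PySem.Set.contains seen lowered then pvTakeA rest shortlist seen n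
    else
      let shortlist' := shortlist ++ [t.2.2.2]
      if n ≤ (shortlist'.length : Int) then shortlist'
      else pvTakeA rest shortlist' (PySem.Set.add seen lowered) n

def select_shortlist (idea_rows : List (List (String × String))) (services : List String) (regions : List String) (top_n : Int) : List String :=
  let ranked := idea_rows.foldl (fun ranked row =>
    let keyword := pvKw row
    if keyword = "" then ranked
    else
      let sr := keyword_relevance_score keyword services regions
      if sr.1 == 0 then ranked
      else ranked ++ [(sr.1, sr.2, pvSearches row, keyword)]) []
  pvTakeA (PySem.List.sorted ranked pvKeyA true) [] PySem.Set.empty top_n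

-- ===== PORT B =====
-- B's sort key (t[0], t[1], t[2], -len(t[3]), -t[4])
def pvKeyB (t : Int × Int × Int × String × Int) : Lex (Int × Lex (Int × Lex (Int × Lex (Int × Int)))) :=
  toLex (t.1, toLex (t.2.1, toLex (t.2.2.1, toLex (-PySem.Str.len t.2.2.2.1, -t.2.2.2.2))))

-- B's final loop over the already unique representatives (keeps the break)
def pvTakeB : List (Int × Int × Int × String × Int) → List String → Int → List String
  | [], shortlist, _ => shortlist
  | t :: rest, shortlist, n =>
    let shortlist' := shortlist ++ [t.2.2.2.1]
    if n ≤ (shortlist'.length : Int) then shortlist'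
    else pvTakeB rest shortlist' n

def select_shortlist_alt (idea_rows : List (List (String × String))) (services : List String) (regions : List String) (top_n : Int) : List String :=
  let best := (PySem.List.enumerate idea_rows).foldl (fun best p =>
    let keyword := pvKw p.2
    if keyword = "" then best
    else
      let lowered := PySem.Str.lower keyword
      let service_hits := pvHits lowered services
      if service_hits == 0 then best
      else
        let entry := (service_hits, pvHits lowered regions, pvSearches p.2, keyword, p.1)
        match best.get? lowered with
        | none => best.insert lowered entry
        | some cur => if cur.2.2.1 < entry.2.2.1 then best.insert lowered entry else best) PySem.Dict.empty
  pvTakeB (PySem.List.sorted best.values pvKeyB true) [] top_n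

-- ===== PRECONDITION & SPEC =====
-- Pre_ excludes exactly the inputs where Python A raises ValueError: a kept row (non-empty
-- stripped keyword, at least one service hit) whose non-empty "avg_monthly_searches" string
-- is not int()-parsable.  B raises there too.
def Pre_select_shortlist (idea_rows : List (List (String × String))) (services : List String) (regions : List String) (top_n : Int) : Prop :=
  idea_rows.all (fun row =>
    let kw := PySem.Str.strip ((PySem.Dict.ofList row).getD "keyword" "")
    (kw == "") ||
    !(services.any (fun sv => PySem.Str.isIn (PySem.Str.lower sv) (PySem.Str.lower kw))) ||
    (((PySem.Dict.ofList row).getD "avg_monthly_searches" "") == "") ||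
    (PySem.Int.ofStr? ((PySem.Dict.ofList row).getD "avg_monthly_searches" "")).isSome) = true
instance (idea_rows : List (List (String × String))) (services : List String) (regions : List String) (top_n : Int) : Decidable (Pre_select_shortlist idea_rows services regions top_n) := by unfold Pre_select_shortlist; infer_instance

def pvWitness_select_shortlist : (List (List (String × String))) × List String × List String × Int :=
  ([[("keyword", "Seo Chat"), ("avg_monthly_searches", "120")], [("keyword", "seo chat"), ("avg_monthly_searches", "7")]], ["seo"], ["chat"], 2)

def Spec_select_shortlist (idea_rows : List (List (String × String))) (services : List String) (regions : List String) (top_n : Int) (out : List String) : Prop := out = select_shortlist_alt idea_rows services regions top_n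
instance (idea_rows : List (List (String × String))) (services : List String) (regions : List String) (top_n : Int) (out : List String) : Decidable (Spec_select_shortlist idea_rows services regions top_n out) := by unfold Spec_select_shortlist; infer_instance

-- ===== CLAIM (what is proved, stated in full; the proofs are below) =====
def Claim_equal_select_shortlist : Prop := ∀ (idea_rows : List (List (String × String))) (services : List String) (regions : List String) (top_n : Int), Dom_select_shortlist idea_rows services regions top_n → Pre_select_shortlist idea_rows services regions top_n → Spec_select_shortlist idea_rows services regions top_n (select_shortlist idea_rows services regions top_n)

-- ===== LEMMAS AND PROOFS =====

-- the per-row step functions of the two ports (definitionally the lambdas in the ports)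
def pvARowStep (services regions : List String) (ranked : List (Int × Int × Int × String)) (row : List (String × String)) : List (Int × Int × Int × String) :=
  let keyword := pvKw row
  if keyword = "" then ranked
  else
    let sr := keyword_relevance_score keyword services regions
    if sr.1 == 0 then ranked
    else ranked ++ [(sr.1, sr.2, pvSearches row, keyword)]

def pvBRowStep (services regions : List String) (best : PySem.Dict String (Int × Int × Int × String × Int)) (p : Int × List (String × String)) : PySem.Dict String (Int × Int × Int × String × Int) :=
  let keyword := pvKw p.2
  if keyword = "" then best
  else
    let lowered := PySem.Str.lower keyword
    let service_hits := pvHits lowered services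
    if service_hits == 0 then best
    else
      let entry := (service_hits, pvHits lowered regions, pvSearches p.2, keyword, p.1)
      match best.get? lowered with
      | none => best.insert lowered entry
      | some cur => if cur.2.2.1 < entry.2.2.1 then best.insert lowered entry else best

-- the lowered keyword of an entry, the projection to A's 4-tuple
def pvLow (t : Int × Int × Int × String × Int) : String := PySem.Str.lower t.2.2.2.1
def pvDrop (t : Int × Int × Int × String × Int) : Int × Int × Int × String := (t.1, t.2.1, t.2.2.1, t.2.2.2.1)

-- the kept rows, decorated with the enumerate index
def pvEntries (services regions : List String) : List (List (String × String)) → Int → List (Int × Int × Int × String × Int)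
  | [], _ => []
  | row :: rows, s =>
    let keyword := pvKw row
    if keyword = "" then pvEntries services regions rows (s + 1)
    else
      let hs := pvHits (PySem.Str.lower keyword) services
      if hs == 0 then pvEntries services regions rows (s + 1)
      else (hs, pvHits (PySem.Str.lower keyword) regions, pvSearches row, keyword, s) :: pvEntries services regions rows (s + 1)

-- B's dict update step, abstracted over the entry
def pvStep (d : PySem.Dict String (Int × Int × Int × String × Int)) (t : Int × Int × Int × String × Int) : PySem.Dict String (Int × Int × Int × String × Int) :=
  match d.get? (pvLow t) with
  | none => d.insert (pvLow t) t
  | some cur => if cur.2.2.1 < t.2.2.1 then d.insert (pvLow t) t else d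

-- the same step, restricted to what happens at one key g
def pvOptStep (g : String) (r : Option (Int × Int × Int × String × Int)) (t : Int × Int × Int × String × Int) : Option (Int × Int × Int × String × Int) :=
  if pvLow t = g then
    match r with
    | none => some t
    | some c => if c.2.2.1 < t.2.2.1 then some t else some c
  else r

-- A's dedup scan (first occurrence per lowered keyword), peeled off its take loop
def pvDedup : PySem.Set String → List (Int × Int × Int × String × Int) → List (Int × Int × Int × String × Int)
  | _, [] => []
  | seen, t :: rest =>
    if PySem.Set.contains seen (pvLow t) then pvDedup seen rest
    else t :: pvDedup (PySem.Set.add seen (pvLow t)) rest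

-- x is the representative of its lowered-keyword group in E: maximal searches, earliest index on ties
def pvRep (E : List (Int × Int × Int × String × Int)) (x : Int × Int × Int × String × Int) : Prop :=
  ∀ y ∈ E, pvLow y = pvLow x → (y.2.2.1 < x.2.2.1 ∨ (y.2.2.1 = x.2.2.1 ∧ x.2.2.2.2 ≤ y.2.2.2.2))

lemma pv_len_lower (s : String) : PySem.Str.len (PySem.Str.lower s) = PySem.Str.len s := by
  simp [PySem.Str.len_eq, PySem.Str.toList_lower, PySem.Chars.lower]

-- entries invariants
lemma pvEntries_idx_lb (services regions : List String) (rows : List (List (String × String))) (s : Int) :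
    ∀ t ∈ pvEntries services regions rows s, s ≤ t.2.2.2.2 := by
  induction rows generalizing s with
  | nil => simp [pvEntries]
  | cons row rows ih =>
    intro t ht
    simp only [pvEntries] at ht
    split_ifs at ht with h1 h2
    · have := ih (s + 1) t ht; omega
    · have := ih (s + 1) t ht; omega
    · rcases List.mem_cons.mp ht with rfl | ht
      · simp
      · have := ih (s + 1) t ht; omega

lemma pvEntries_idx_sorted (services regions : List String) (rows : List (List (String × String))) (s : Int) :
    (pvEntries services regions rows s).Pairwise (fun a b => a.2.2.2.2 < b.2.2.2.2) := by
  induction rows generalizing s with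
  | nil => simp [pvEntries]
  | cons row rows ih =>
    simp only [pvEntries]
    split_ifs with h1 h2
    · exact ih (s + 1)
    · exact ih (s + 1)
    · refine List.pairwise_cons.mpr ⟨?_, ih (s + 1)⟩
      intro b hb
      have := pvEntries_idx_lb services regions rows (s + 1) b hb
      simpa using by omega

lemma pvEntries_comp (services regions : List String) (rows : List (List (String × String))) (s : Int) :
    ∀ t ∈ pvEntries services regions rows s,
      t.1 = pvHits (pvLow t) services ∧ t.2.1 = pvHits (pvLow t) regions := by
  induction rows generalizing s with
  | nil => simp [pvEntries]
  | cons row rows ih =>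
    intro t ht
    simp only [pvEntries] at ht
    split_ifs at ht with h1 h2
    · exact ih (s + 1) t ht
    · exact ih (s + 1) t ht
    · rcases List.mem_cons.mp ht with rfl | ht
      · simp [pvLow]
      · exact ih (s + 1) t ht

-- A's ranked list is the entries without the index
lemma pv_ranked_eq (services regions : List String) (rows : List (List (String × String))) (s : Int)
    (acc : List (Int × Int × Int × String)) :
    rows.foldl (pvARowStep services regions) acc
    = acc ++ (pvEntries services regions rows s).map pvDrop := by
  induction rows generalizing s acc with
  | nil => simp [pvEntries]
  | cons row rows ih =>
    rw [List.foldl_cons]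
    by_cases h1 : pvKw row = ""
    · rw [show pvARowStep services regions acc row = acc by
        simp [pvARowStep, h1]]
      rw [ih (s + 1)]
      simp only [pvEntries, if_pos h1]
    · by_cases h2 : (pvHits (PySem.Str.lower (pvKw row)) services == 0) = true
      · rw [show pvARowStep services regions acc row = acc by
          simp only [pvARowStep, keyword_relevance_score, if_neg h1]
          simp [h2]]
        rw [ih (s + 1)]
        simp only [pvEntries, if_neg h1]
        rw [if_pos h2]
      · rw [show pvARowStep services regions acc row
            = acc ++ [(pvHits (PySem.Str.lower (pvKw row)) services,
                pvHits (PySem.Str.lower (pvKw row)) regions, pvSearches row, pvKw row)] by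
          simp only [pvARowStep, keyword_relevance_score, if_neg h1]
          simp [h2]]
        rw [ih (s + 1)]
        simp only [pvEntries, if_neg h1]
        rw [if_neg h2]
        simp [pvDrop]

-- B's dict loop is the entries folded through pvStep
lemma pv_dict_eq (services regions : List String) (rows : List (List (String × String))) (s : Int)
    (d : PySem.Dict String (Int × Int × Int × String × Int)) :
    (PySem.List.enumerate rows s).foldl (pvBRowStep services regions) d
    = (pvEntries services regions rows s).foldl pvStep d := by
  induction rows generalizing s d with
  | nil => simp [pvEntries, PySem.List.enumerate]
  | cons row rows ih =>
    rw [PySem.List.enumerate_cons, List.foldl_cons]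
    by_cases h1 : pvKw row = ""
    · rw [show pvBRowStep services regions d (s, row) = d by simp [pvBRowStep, h1]]
      rw [ih (s + 1)]
      simp only [pvEntries, if_pos h1]
    · by_cases h2 : (pvHits (PySem.Str.lower (pvKw row)) services == 0) = true
      · rw [show pvBRowStep services regions d (s, row) = d by
          simp only [pvBRowStep, if_neg h1]
          simp [h2]]
        rw [ih (s + 1)]
        simp only [pvEntries, if_neg h1]
        rw [if_pos h2]
      · rw [show pvBRowStep services regions d (s, row)
            = pvStep d (pvHits (PySem.Str.lower (pvKw row)) services,
                pvHits (PySem.Str.lower (pvKw row)) regions, pvSearches row, pvKw row, s) by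
          simp only [pvBRowStep, if_neg h1]
          rw [if_neg h2]
          simp only [pvStep, pvLow]]
        rw [ih (s + 1)]
        simp only [pvEntries, if_neg h1]
        rw [if_neg h2]
        rw [List.foldl_cons]

-- key bridge lemmas
lemma pv_keyB_lt_iff_keyA (x y : Int × Int × Int × String × Int) (h : y.2.2.2.2 < x.2.2.2.2) :
    (pvKeyB y < pvKeyB x) ↔ (pvKeyA (pvDrop y) < pvKeyA (pvDrop x)) := by
  simp only [pvKeyA, pvKeyB, pvDrop, Prod.Lex.lt_iff, ofLex_toLex]
  omega

lemma pv_keyB_lt_iff_group (x y : Int × Int × Int × String × Int)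
    (h1 : y.1 = x.1) (h2 : y.2.1 = x.2.1) (h4 : PySem.Str.len y.2.2.2.1 = PySem.Str.len x.2.2.2.1) :
    (pvKeyB y < pvKeyB x) ↔ (y.2.2.1 < x.2.2.1 ∨ (y.2.2.1 = x.2.2.1 ∧ x.2.2.2.2 < y.2.2.2.2)) := by
  simp only [pvKeyB, Prod.Lex.lt_iff, ofLex_toLex]
  omega

lemma pv_keyB_inj (x y : Int × Int × Int × String × Int) (hk : pvKeyB x = pvKeyB y) :
    x.2.2.2.2 = y.2.2.2.2 := by
  simp only [pvKeyB, toLex_inj, Prod.mk.injEq] at hk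
  omega

-- sort commutation: sorting the 4-tuples stably = sorting the index-decorated 5-tuples and dropping the index
lemma pv_insertBy_map (x : Int × Int × Int × String × Int) (acc : List (Int × Int × Int × String × Int))
    (h : ∀ y ∈ acc, y.2.2.2.2 < x.2.2.2.2) :
    (PySem.List.insertBy (fun a b => decide (pvKeyB b < pvKeyB a)) x acc).map pvDrop
      = PySem.List.insertBy (fun a b => decide (pvKeyA b < pvKeyA a)) (pvDrop x) (acc.map pvDrop) := by
  induction acc with
  | nil => simp [PySem.List.insertBy]
  | cons y ys ih =>
    have hy : (decide (pvKeyB y < pvKeyB x)) = decide (pvKeyA (pvDrop y) < pvKeyA (pvDrop x)) :=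
      decide_eq_decide.mpr (pv_keyB_lt_iff_keyA x y (h y (List.mem_cons_self ..)))
    simp only [PySem.List.insertBy, List.map_cons, ← hy]
    by_cases hc : (decide (pvKeyB y < pvKeyB x)) = true
    · simp [hc]
    · simp only [Bool.not_eq_true] at hc
      simp only [hc, if_neg Bool.false_ne_true, List.map_cons, List.cons.injEq, true_and]
      exact ih (fun z hz => h z (List.mem_cons_of_mem _ hz))

lemma pv_sort_commute (E : List (Int × Int × Int × String × Int))
    (hE : E.Pairwise (fun a b => a.2.2.2.2 < b.2.2.2.2)) :
    PySem.List.sorted (E.map pvDrop) pvKeyA true = (PySem.List.sorted E pvKeyB true).map pvDrop := by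
  rw [PySem.List.sorted_rev_eq_foldl_insertBy, PySem.List.sorted_rev_eq_foldl_insertBy]
  suffices h : ∀ (E : List (Int × Int × Int × String × Int)) (acc : List (Int × Int × Int × String × Int)),
      (∀ y ∈ acc, ∀ x ∈ E, y.2.2.2.2 < x.2.2.2.2) →
      E.Pairwise (fun a b => a.2.2.2.2 < b.2.2.2.2) →
      (E.foldl (fun acc x => PySem.List.insertBy (fun a b => decide (pvKeyB b < pvKeyB a)) x acc) acc).map pvDrop
        = (E.map pvDrop).foldl (fun acc x => PySem.List.insertBy (fun a b => decide (pvKeyA b < pvKeyA a)) x acc) (acc.map pvDrop) by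
    have h2 := h E [] (by intro y hy; cases hy) hE
    simpa using h2.symm
  intro E'
  induction E' with
  | nil => intro acc _ _; simp
  | cons x t ih =>
    intro acc hacc hpw
    rcases List.pairwise_cons.mp hpw with ⟨hx, hpt⟩
    simp only [List.foldl_cons, List.map_cons]
    rw [← pv_insertBy_map x acc (fun y hy => hacc y hy x (List.mem_cons_self ..))]
    apply ih
    · intro y hy x' hx'
      rcases (PySem.List.mem_insertBy _ _ _ _).mp hy with rfl | hy'
      · exact hx x' hx'
      · exact hacc y hy' x' (List.mem_cons_of_mem _ hx')
    · exact hpt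

-- dict lookup characterisation
lemma pv_get?_fold (E : List (Int × Int × Int × String × Int))
    (d : PySem.Dict String (Int × Int × Int × String × Int)) (g : String) :
    (E.foldl pvStep d).get? g = E.foldl (pvOptStep g) (d.get? g) := by
  induction E generalizing d with
  | nil => simp
  | cons t E ih =>
    rw [List.foldl_cons, List.foldl_cons, ih]
    congr 1
    unfold pvStep pvOptStep
    by_cases hg : pvLow t = g
    · subst hg
      cases hd : d.get? (pvLow t) with
      | none => simp [PySem.Dict.get?_insert]
      | some c =>
        simp only [if_pos rfl]
        split_ifs with hm
        · simp [PySem.Dict.get?_insert]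
        · simp [hd]
    · cases hd : d.get? (pvLow t) with
      | none => simp [PySem.Dict.get?_insert, hg, Ne.symm hg]
      | some c =>
        simp only [pvOptStep, if_neg hg]
        split_ifs with hm
        · simp [PySem.Dict.get?_insert, Ne.symm hg]
        · rfl

lemma pv_nodup_keys_fold (E : List (Int × Int × Int × String × Int))
    (d : PySem.Dict String (Int × Int × Int × String × Int)) (h : d.keys.Nodup) :
    (E.foldl pvStep d).keys.Nodup := by
  induction E generalizing d with
  | nil => simpa
  | cons t E ih =>
    rw [List.foldl_cons]
    apply ih
    unfold pvStep
    cases d.get? (pvLow t) with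
    | none => exact PySem.Dict.nodup_keys_insert _ _ _ h
    | some c =>
      dsimp only
      split_ifs
      · exact PySem.Dict.nodup_keys_insert _ _ _ h
      · exact h

lemma pv_optfold_ne_none (g : String) :
    ∀ (E : List (Int × Int × Int × String × Int)) (c : Int × Int × Int × String × Int),
      E.foldl (pvOptStep g) (some c) ≠ none := by
  intro E
  induction E with
  | nil => intro c h; cases h
  | cons t E ih =>
    intro c
    rw [List.foldl_cons]
    simp only [pvOptStep]
    by_cases hg : pvLow t = g
    · rw [if_pos hg]
      split_ifs
      · exact ih t
      · exact ih c
    · rw [if_neg hg]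
      exact ih c

lemma pv_optfold_none_iff (E : List (Int × Int × Int × String × Int)) (g : String) :
    E.foldl (pvOptStep g) none = none ↔ ∀ y ∈ E, pvLow y ≠ g := by
  induction E with
  | nil => simp
  | cons t E ih =>
    rw [List.foldl_cons]
    by_cases hg : pvLow t = g
    · simp only [pvOptStep, if_pos hg]
      constructor
      · intro h; exact absurd h (pv_optfold_ne_none g E t)
      · intro h; exact absurd hg (h t (List.mem_cons_self ..))
    · simp only [pvOptStep, if_neg hg]
      rw [ih]
      constructor
      · intro h y hy
        rcases List.mem_cons.mp hy with rfl | hy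
        · exact hg
        · exact h y hy
      · intro h y hy
        exact h y (List.mem_cons_of_mem _ hy)

lemma pv_optfold_some (g : String) :
    ∀ (E : List (Int × Int × Int × String × Int)),
      E.Pairwise (fun a b => a.2.2.2.2 < b.2.2.2.2) →
      ∀ x, E.foldl (pvOptStep g) none = some x → x ∈ E ∧ pvLow x = g ∧ pvRep E x := by
  intro E
  induction E using List.reverseRecOn with
  | nil => intro _ x hx; cases hx
  | append_singleton E t ih =>
    intro hE x hx
    rw [List.foldl_append, List.foldl_cons, List.foldl_nil] at hx
    rcases List.pairwise_append.mp hE with ⟨hE', _, hcross⟩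
    have hlt : ∀ y ∈ E, y.2.2.2.2 < t.2.2.2.2 := fun y hy => hcross y hy t (by simp)
    by_cases hg : pvLow t = g
    · cases hr : E.foldl (pvOptStep g) none with
      | none =>
        rw [hr] at hx
        simp only [pvOptStep, if_pos hg] at hx
        obtain rfl : t = x := by injection hx
        refine ⟨by simp, hg, ?_⟩
        intro y hy hgy
        rcases List.mem_append.mp hy with hy | hy
        · exact absurd (hgy.trans hg) ((pv_optfold_none_iff E g).mp hr y hy)
        · simp only [List.mem_singleton] at hy
          subst hy
          exact Or.inr ⟨rfl, le_refl _⟩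
      | some c =>
        rw [hr] at hx
        obtain ⟨hcE, hcg, hcrep⟩ := ih hE' c hr
        simp only [pvOptStep, if_pos hg] at hx
        split_ifs at hx with hm
        · obtain rfl : t = x := by injection hx
          refine ⟨by simp, hg, ?_⟩
          intro y hy hgy
          rcases List.mem_append.mp hy with hy | hy
          · have := hcrep y hy (by rw [hgy, hg, hcg])
            left; omega
          · simp only [List.mem_singleton] at hy
            subst hy
            exact Or.inr ⟨rfl, le_refl _⟩
        · obtain rfl : c = x := by injection hx
          refine ⟨List.mem_append_left _ hcE, hcg, ?_⟩
          intro y hy hgy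
          rcases List.mem_append.mp hy with hy | hy
          · exact hcrep y hy hgy
          · simp only [List.mem_singleton] at hy
            subst hy
            have := hlt c hcE
            omega
    · simp only [pvOptStep, if_neg hg] at hx
      obtain ⟨hxE, hxg, hxrep⟩ := ih hE' x hx
      refine ⟨List.mem_append_left _ hxE, hxg, ?_⟩
      intro y hy hgy
      rcases List.mem_append.mp hy with hy | hy
      · exact hxrep y hy hgy
      · simp only [List.mem_singleton] at hy
        subst hy
        exact absurd (hgy.trans hxg) hg

lemma pv_idx_inj (E : List (Int × Int × Int × String × Int))
    (hE : E.Pairwise (fun a b => a.2.2.2.2 < b.2.2.2.2)) :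
    ∀ x ∈ E, ∀ y ∈ E, x.2.2.2.2 = y.2.2.2.2 → x = y := by
  have h' : E.Pairwise (fun a b => a.2.2.2.2 = b.2.2.2.2 → a = b) :=
    hE.imp (fun h heq => absurd heq (by omega))
  intro x hx y hy h
  by_cases hxy : x = y
  · exact hxy
  · exact List.Pairwise.forall (fun a b hab heq => (hab heq.symm).symm) h' hx hy hxy h

lemma pv_rep_unique (E : List (Int × Int × Int × String × Int))
    (hE : E.Pairwise (fun a b => a.2.2.2.2 < b.2.2.2.2))
    {x y : Int × Int × Int × String × Int} (hx : x ∈ E) (hy : y ∈ E)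
    (hrx : pvRep E x) (hry : pvRep E y) (hg : pvLow x = pvLow y) : x = y := by
  have h1 := hrx y hy hg.symm
  have h2 := hry x hx hg
  exact pv_idx_inj E hE x hx y hy (by omega)

lemma pv_mem_values_iff (E : List (Int × Int × Int × String × Int))
    (hE : E.Pairwise (fun a b => a.2.2.2.2 < b.2.2.2.2))
    (v : Int × Int × Int × String × Int) :
    v ∈ (E.foldl pvStep PySem.Dict.empty).values ↔ (v ∈ E ∧ pvRep E v) := by
  have hnd : (E.foldl pvStep PySem.Dict.empty).keys.Nodup :=
    pv_nodup_keys_fold E _ PySem.Dict.nodup_keys_empty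
  rw [PySem.Dict.values_eq_map_keys _ hnd ((0 : Int), (0 : Int), (0 : Int), "", (0 : Int))]
  constructor
  · intro hv
    rcases List.mem_map.mp hv with ⟨k, hk, hgd⟩
    obtain ⟨w, hw⟩ : ∃ w, (E.foldl pvStep PySem.Dict.empty).get? k = some w := by
      cases hq : (E.foldl pvStep PySem.Dict.empty).get? k with
      | none => exact absurd ((PySem.Dict.get?_eq_none_iff_not_mem_keys _ _).mp hq) (by simpa using hk)
      | some w => exact ⟨w, rfl⟩
    have hwv : w = v := by
      rw [← hgd]
      exact (PySem.Dict.getD_of_get?_eq_some _ _ hw).symm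
    subst hwv
    rw [pv_get?_fold, PySem.Dict.get?_empty] at hw
    obtain ⟨hwe, _, hwr⟩ := pv_optfold_some k E hE w hw
    exact ⟨hwe, hwr⟩
  · rintro ⟨hvE, hrep⟩
    have hne : E.foldl (pvOptStep (pvLow v)) none ≠ none := by
      intro hq
      exact (pv_optfold_none_iff E (pvLow v)).mp hq v hvE rfl
    cases hq : E.foldl (pvOptStep (pvLow v)) none with
    | none => exact absurd hq hne
    | some c =>
      obtain ⟨hcE, hcg, hcrep⟩ := pv_optfold_some (pvLow v) E hE c hq
      obtain rfl : c = v := pv_rep_unique E hE hcE hvE hcrep hrep hcg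
      have hget : (E.foldl pvStep PySem.Dict.empty).get? (pvLow c) = some c := by
        rw [pv_get?_fold, PySem.Dict.get?_empty]
        exact hq
      refine List.mem_map.mpr ⟨pvLow c, ?_, PySem.Dict.getD_of_get?_eq_some _ _ hget⟩
      by_contra hk
      rw [← PySem.Dict.get?_eq_none_iff_not_mem_keys] at hk
      rw [hget] at hk
      cases hk

lemma pv_nodup_values (E : List (Int × Int × Int × String × Int))
    (hE : E.Pairwise (fun a b => a.2.2.2.2 < b.2.2.2.2)) :
    (E.foldl pvStep PySem.Dict.empty).values.Nodup := by
  have hnd : (E.foldl pvStep PySem.Dict.empty).keys.Nodup :=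
    pv_nodup_keys_fold E _ PySem.Dict.nodup_keys_empty
  rw [PySem.Dict.values_eq_map_keys _ hnd ((0 : Int), (0 : Int), (0 : Int), "", (0 : Int))]
  refine List.Nodup.map_on ?_ hnd
  intro k hk k' hk' heq
  obtain ⟨w, hw⟩ : ∃ w, (E.foldl pvStep PySem.Dict.empty).get? k = some w := by
    cases hq : (E.foldl pvStep PySem.Dict.empty).get? k with
    | none => exact absurd ((PySem.Dict.get?_eq_none_iff_not_mem_keys _ _).mp hq) (by simpa using hk)
    | some w => exact ⟨w, rfl⟩
  obtain ⟨w', hw'⟩ : ∃ w', (E.foldl pvStep PySem.Dict.empty).get? k' = some w' := by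
    cases hq : (E.foldl pvStep PySem.Dict.empty).get? k' with
    | none => exact absurd ((PySem.Dict.get?_eq_none_iff_not_mem_keys _ _).mp hq) (by simpa using hk')
    | some w => exact ⟨w, rfl⟩
  have he1 := PySem.Dict.getD_of_get?_eq_some _ ((0 : Int), (0 : Int), (0 : Int), "", (0 : Int)) hw
  have he2 := PySem.Dict.getD_of_get?_eq_some _ ((0 : Int), (0 : Int), (0 : Int), "", (0 : Int)) hw'
  have hww : w = w' := by rw [← he1, ← he2, heq]
  subst hww
  rw [pv_get?_fold, PySem.Dict.get?_empty] at hw hw'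
  obtain ⟨_, hg1, _⟩ := pv_optfold_some k E hE w hw
  obtain ⟨_, hg2, _⟩ := pv_optfold_some k' E hE w hw'
  rw [← hg1, ← hg2]

lemma pv_contains_iff (s : PySem.Set String) (a : String) :
    PySem.Set.contains s a = true ↔ a ∈ s := by
  simp [PySem.Set.contains, List.contains_iff_mem]

-- dedup scan characterisation
lemma pv_dedup_sublist (seen : PySem.Set String) (L : List (Int × Int × Int × String × Int)) :
    (pvDedup seen L).Sublist L := by
  induction L generalizing seen with
  | nil => simp [pvDedup]
  | cons t L ih =>
    simp only [pvDedup]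
    split_ifs with h
    · exact (ih seen).cons t
    · exact (ih _).cons₂ t

lemma pv_mem_dedup (L : List (Int × Int × Int × String × Int))
    (hpw : L.Pairwise (fun a b => pvKeyB b < pvKeyB a)) :
    ∀ (seen : PySem.Set String) (x : Int × Int × Int × String × Int),
      x ∈ pvDedup seen L ↔ (x ∈ L ∧ pvLow x ∉ seen ∧
        ∀ y ∈ L, pvLow y = pvLow x → pvKeyB y ≤ pvKeyB x) := by
  revert hpw
  induction L with
  | nil => intro _ seen x; simp [pvDedup]
  | cons t L ih =>
    intro hpw seen x
    rcases List.pairwise_cons.mp hpw with ⟨hlt, hpw'⟩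
    simp only [pvDedup]
    split_ifs with hseen
    · have htm : pvLow t ∈ seen := pv_contains_iff seen (pvLow t) |>.mp hseen
      rw [ih hpw' seen x]
      constructor
      · rintro ⟨hxL, hxs, hall⟩
        refine ⟨List.mem_cons_of_mem _ hxL, hxs, ?_⟩
        intro y hy hgy
        rcases List.mem_cons.mp hy with rfl | hy
        · exact absurd (hgy ▸ htm) hxs
        · exact hall y hy hgy
      · rintro ⟨hxL, hxs, hall⟩
        rcases List.mem_cons.mp hxL with rfl | hxL
        · exact absurd htm hxs
        · exact ⟨hxL, hxs, fun y hy hgy => hall y (List.mem_cons_of_mem _ hy) hgy⟩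
    · have htm : pvLow t ∉ seen := fun hm => hseen ((pv_contains_iff seen (pvLow t)).mpr hm)
      constructor
      · intro hmem
        rcases List.mem_cons.mp hmem with rfl | hmem
        · refine ⟨List.mem_cons_self .., htm, ?_⟩
          intro y hy hgy
          rcases List.mem_cons.mp hy with rfl | hy
          · exact le_refl _
          · exact le_of_lt (hlt y hy)
        · obtain ⟨hxL, hxs, hall⟩ := (ih hpw' (PySem.Set.add seen (pvLow t)) x).mp hmem
          have hxs' : pvLow x ∉ seen ∧ pvLow x ≠ pvLow t := by
            constructor
            · intro hm; exact hxs ((PySem.Set.mem_add seen _ _).mpr (Or.inl hm))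
            · intro hm; exact hxs ((PySem.Set.mem_add seen _ _).mpr (Or.inr hm))
          refine ⟨List.mem_cons_of_mem _ hxL, hxs'.1, ?_⟩
          intro y hy hgy
          rcases List.mem_cons.mp hy with rfl | hy
          · exact absurd hgy.symm hxs'.2
          · exact hall y hy hgy
      · rintro ⟨hxL, hxs, hall⟩
        rcases List.mem_cons.mp hxL with rfl | hxL
        · exact List.mem_cons_self ..
        · refine List.mem_cons_of_mem _ ((ih hpw' (PySem.Set.add seen (pvLow t)) x).mpr ⟨hxL, ?_, fun y hy hgy => hall y (List.mem_cons_of_mem _ hy) hgy⟩)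
          intro hm
          rcases (PySem.Set.mem_add seen _ _).mp hm with hm | hm
          · exact hxs hm
          · have h1 := hall t (List.mem_cons_self ..) hm.symm
            have h2 := hlt x hxL
            exact absurd h1 (not_le.mpr h2)

-- within one lowered-keyword group of the entries, the sort key order is the (searches, -index) order
lemma pv_entries_le_iff (services regions : List String) (rows : List (List (String × String))) (s : Int)
    {x y : Int × Int × Int × String × Int}
    (hx : x ∈ pvEntries services regions rows s) (hy : y ∈ pvEntries services regions rows s)
    (hg : pvLow y = pvLow x) :
    pvKeyB y ≤ pvKeyB x ↔ (y.2.2.1 < x.2.2.1 ∨ (y.2.2.1 = x.2.2.1 ∧ x.2.2.2.2 ≤ y.2.2.2.2)) := by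
  obtain ⟨hx1, hx2⟩ := pvEntries_comp services regions rows s x hx
  obtain ⟨hy1, hy2⟩ := pvEntries_comp services regions rows s y hy
  have h1 : y.1 = x.1 := by rw [hy1, hx1, hg]
  have h2 : y.2.1 = x.2.1 := by rw [hy2, hx2, hg]
  have h4 : PySem.Str.len y.2.2.2.1 = PySem.Str.len x.2.2.2.1 := by
    have hh := congrArg PySem.Str.len hg
    simp only [pvLow, pv_len_lower] at hh
    exact hh
  rw [← not_lt, pv_keyB_lt_iff_group y x h1.symm h2.symm h4.symm]
  omega

-- the take loops agree once the dedup is peeled off A's loop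
lemma pv_take_eq (L : List (Int × Int × Int × String × Int)) :
    ∀ (seen : PySem.Set String) (sl : List String) (n : Int),
      pvTakeA (L.map pvDrop) sl seen n = pvTakeB (pvDedup seen L) sl n := by
  induction L with
  | nil => intro seen sl n; simp [pvTakeA, pvTakeB, pvDedup]
  | cons t L ih =>
    intro seen sl n
    simp only [List.map_cons, pvTakeA, pvTakeB, pvDedup, pvDrop, pvLow]
    by_cases h1 : PySem.Set.contains seen (PySem.Str.lower t.2.2.2.1) = true
    · rw [if_pos h1, if_pos h1]
      exact ih seen sl n
    · rw [if_neg h1, if_neg h1]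
      simp only [pvTakeB]
      by_cases h2 : n ≤ ((sl ++ [t.2.2.2.1]).length : Int)
      · rw [if_pos h2, if_pos h2]
      · rw [if_neg h2, if_neg h2]
        exact ih _ _ n

-- ===== VERDICT (by name: the statement is the Claim_ definition above) =====
theorem select_shortlist_spec : Claim_equal_select_shortlist := by
  intro idea_rows services regions top_n _ _
  unfold Spec_select_shortlist
  have hA : select_shortlist idea_rows services regions top_n
      = pvTakeA (PySem.List.sorted (idea_rows.foldl (pvARowStep services regions) []) pvKeyA true) [] PySem.Set.empty top_n := rfl
  have hB : select_shortlist_alt idea_rows services regions top_n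
      = pvTakeB (PySem.List.sorted ((PySem.List.enumerate idea_rows).foldl (pvBRowStep services regions) PySem.Dict.empty).values pvKeyB true) [] top_n := rfl
  rw [hA, hB, pv_ranked_eq services regions idea_rows 0 [], pv_dict_eq services regions idea_rows 0, List.nil_append]
  have hpairs : (pvEntries services regions idea_rows 0).Pairwise (fun a b => a.2.2.2.2 < b.2.2.2.2) :=
    pvEntries_idx_sorted services regions idea_rows 0
  set E := pvEntries services regions idea_rows 0 with hEdef
  rw [pv_sort_commute E hpairs, pv_take_eq (PySem.List.sorted E pvKeyB true) PySem.Set.empty [] top_n]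
  set S := PySem.List.sorted E pvKeyB true with hSdef
  suffices h : PySem.List.sorted (E.foldl pvStep PySem.Dict.empty).values pvKeyB true = pvDedup PySem.Set.empty S by
    rw [h]
  have hSperm : S.Perm E := PySem.List.sorted_perm E pvKeyB true
  have hEnodup : E.Nodup := hpairs.imp (fun h heq => by subst heq; omega)
  have hSnodup : S.Nodup := hSperm.nodup_iff.mpr hEnodup
  have hSpair : S.Pairwise (fun a b => pvKeyB b < pvKeyB a) := by
    have hle := PySem.List.sorted_pairwise_rev E pvKeyB
    have hcomb := List.Pairwise.and_mem.mp (hle.and hSnodup)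
    refine hcomb.imp ?_
    rintro a b ⟨ha, hb, hled, hne⟩
    rcases eq_or_lt_of_le hled with heq | hlt
    · exfalso
      apply hne
      have hidx := pv_keyB_inj b a heq
      exact pv_idx_inj E hpairs a (hSperm.subset ha) b (hSperm.subset hb) (by omega)
    · exact hlt
  have hdSub := pv_dedup_sublist PySem.Set.empty S
  have hdpair := hSpair.sublist hdSub
  have hdnodup := hSnodup.sublist hdSub
  have hvnodup := pv_nodup_values E hpairs
  have hmemd : ∀ x, x ∈ pvDedup PySem.Set.empty S ↔ (x ∈ E ∧ pvRep E x) := by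
    intro x
    rw [pv_mem_dedup S hSpair PySem.Set.empty x]
    constructor
    · rintro ⟨hxS, _, hall⟩
      have hxE := hSperm.subset hxS
      refine ⟨hxE, ?_⟩
      intro y hy hgy
      have hyS : y ∈ S := hSperm.mem_iff.mpr hy
      have hle := hall y hyS hgy
      exact (pv_entries_le_iff services regions idea_rows 0 hxE hy hgy).mp hle
    · rintro ⟨hxE, hrep⟩
      refine ⟨hSperm.mem_iff.mpr hxE, by simp [PySem.Set.empty], ?_⟩
      intro y hyS hgy
      have hyE := hSperm.subset hyS
      exact (pv_entries_le_iff services regions idea_rows 0 hxE hyE hgy).mpr (hrep y hyE hgy)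
  have hperm : (pvDedup PySem.Set.empty S).Perm (E.foldl pvStep PySem.Dict.empty).values :=
    (List.perm_ext_iff_of_nodup hdnodup hvnodup).mpr
      (fun a => (hmemd a).trans (pv_mem_values_iff E hpairs a).symm)
  exact PySem.List.sorted_rev_eq_of_perm_of_pairwise_gt _ _ pvKeyB hperm hdpair
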